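-- pv_equiv track=rewrite | github.com/AlexZuniga92x/lhcb-software | Bender/Phys/BenderTools/python/BenderTools/Parser.py | dataType
-- ===== SOURCE A (Python) =====
-- def dataType ( files ) :
--     """
--     extract the data type,
--     simulation type and input type from file name
--
--     >>> file_names  = ...
--     >>> data_type, simulation,ext = daataType ( file_names )
--
--     """
--     #
--     if isinstance ( files  , str ) : files = [ files ]
--     #
--     dtype = ''
--     simu  = False
--     ext   = ''
--     for f in files  :
--         #
--         fu = f.upper()
--         if   0 <= fu.find ( 'COLLISION09'   ) : dtype = '2009'
--         elif 0 <= fu.find ( 'COLLISION10'   ) : dtype = '2010'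
--         elif 0 <= fu.find ( 'COLLISION11'   ) : dtype = '2011'
--         elif 0 <= fu.find ( 'COLLISION12'   ) : dtype = '2012'
--         elif 0 <= fu.find ( 'COLLISION13'   ) : dtype = '2012' ## ATTENTION
--         elif 0 <= fu.find ( 'COLLISION15'   ) : dtype = '2015'
--         elif 0 <= fu.find ( 'COLLISION16'   ) : dtype = '2016'
--         #
--         elif 0 <= fu.find ( 'STRIPPING13'   ) : dtype = '2011'
--         elif 0 <= fu.find ( 'STRIPPING17'   ) : dtype = '2011'
--         elif 0 <= fu.find ( 'STRIPPING15'   ) : dtype = '2011'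
--         elif 0 <= fu.find ( 'STRIPPING19'   ) : dtype = '2012'
--         #
--         elif 0 <= fu.find ( 'STRIPPING20R1' ) : dtype = '2011'
--         elif 0 <= fu.find ( 'STRIPPING20'   ) : dtype = '2012'
--         #
--         elif 0 <= fu.find ( 'STRIPPING21R1' ) : dtype = '2011'
--         elif 0 <= fu.find ( 'STRIPPING21'   ) : dtype = '2012'
--         #
--         elif 0 <= fu.find ( 'STRIPPING22'   ) : dtype = '2015'
--         elif 0 <= fu.find ( 'STRIPPING23'   ) : dtype = '2015'
--         elif 0 <= fu.find ( 'STRIPPING24'   ) : dtype = '2015'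
--         #
--         elif 0 <= fu.find ( '2K+10'         ) : dtype = '2010'
--         elif 0 <= fu.find ( '2K+11'         ) : dtype = '2011'
--         elif 0 <= fu.find ( '2K+12'         ) : dtype = '2012'
--         elif 0 <= fu.find ( '2K+13'         ) : dtype = '2013'
--         elif 0 <= fu.find ( '2K+15'         ) : dtype = '2015'
--         elif 0 <= fu.find ( '2K+16'         ) : dtype = '2016'
--
--         #
--         if   0 <= fu.find ( 'MC09' ) or 0 <= fu.find ( 'MC/2009' ) :
--             dtype = '2009'
--             simu  = True
--         elif 0 <= fu.find ( 'MC10' ) or 0 <= fu.find ( 'MC/2010' ) :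
--             dtype = '2010'
--             simu  = True
--         elif 0 <= fu.find ( 'MC11' ) or 0 <= fu.find ( 'MC/2011' ) :
--             dtype = '2011'
--             simu  = True
--         elif 0 <= fu.find ( 'MC12' ) or 0 <= fu.find ( 'MC/2012' ) :
--             dtype = '2012'
--             simu  = True
--         elif 0 <= fu.find ( 'MC13' ) or 0 <= fu.find ( 'MC/2013' ) :
--             dtype = '2013' ## ??
--             simu  = True
--         elif 0 <= fu.find ( 'MC15' ) or 0 <= fu.find ( 'MC/2015' ) :
--             dtype = '2015'
--             simu  = True
--         elif 0 <= fu.find ( '/MC/'    ) : simu = True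
--         elif 0 <= fu.find ( 'PYTHIA'  ) : simu = True
--         elif 0 <= fu.find ( 'BCVEGPY' ) : simu = True
--
--
--         flst = f.split(' ')
--         for _f in flst :
--             _ff = _f.strip('"').strip("'")
--             ## allow up to 5 symbols for exension
--             first,dot,second = _ff.rpartition('.')
--             if dot and 3<=len(second)<=5 and not ext : ext = second.upper()
--
--     return  dtype,simu,ext
-- ===== SOURCE B (Python) =====
-- # Different decomposition: instead of A's single stateful accumulator loop, three
-- # independent passes -- dtype found by scanning files BACK-TO-FRONT for the first
-- # file that determines a year (last-wins becomes first-from-the-end, early exit),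
-- # simu computed with any(), extension with a forward first-match generator.
--
-- def _mc_year(fu):
--     if 'MC09' in fu or 'MC/2009' in fu: return '2009'
--     if 'MC10' in fu or 'MC/2010' in fu: return '2010'
--     if 'MC11' in fu or 'MC/2011' in fu: return '2011'
--     if 'MC12' in fu or 'MC/2012' in fu: return '2012'
--     if 'MC13' in fu or 'MC/2013' in fu: return '2013'
--     if 'MC15' in fu or 'MC/2015' in fu: return '2015'
--     return None
--
-- def _run_year(fu):
--     if 'COLLISION09' in fu: return '2009'
--     if 'COLLISION10' in fu: return '2010'
--     if 'COLLISION11' in fu: return '2011'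
--     if 'COLLISION12' in fu: return '2012'
--     if 'COLLISION13' in fu: return '2012'
--     if 'COLLISION15' in fu: return '2015'
--     if 'COLLISION16' in fu: return '2016'
--     if 'STRIPPING13' in fu: return '2011'
--     if 'STRIPPING17' in fu: return '2011'
--     if 'STRIPPING15' in fu: return '2011'
--     if 'STRIPPING19' in fu: return '2012'
--     if 'STRIPPING20R1' in fu: return '2011'
--     if 'STRIPPING20' in fu: return '2012'
--     if 'STRIPPING21R1' in fu: return '2011'
--     if 'STRIPPING21' in fu: return '2012'
--     if 'STRIPPING22' in fu: return '2015'
--     if 'STRIPPING23' in fu: return '2015'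
--     if 'STRIPPING24' in fu: return '2015'
--     if '2K+10' in fu: return '2010'
--     if '2K+11' in fu: return '2011'
--     if '2K+12' in fu: return '2012'
--     if '2K+13' in fu: return '2013'
--     if '2K+15' in fu: return '2015'
--     if '2K+16' in fu: return '2016'
--     return None
--
-- def _year(fu):
--     # the year this single file would set, or None (MC overrides the run year)
--     return _mc_year(fu) or _run_year(fu)
--
-- def _is_simu(fu):
--     return (_mc_year(fu) is not None or '/MC/' in fu
--             or 'PYTHIA' in fu or 'BCVEGPY' in fu)
--
-- def _ext(f):
--     for tok in f.split(' '):
--         t = tok.strip('"').strip("'")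
--         _first, dot, second = t.rpartition('.')
--         if dot and 3 <= len(second) <= 5:
--             return second.upper()
--     return None
--
-- def dataType(files):
--     if isinstance(files, str):
--         files = [files]
--     ups = [f.upper() for f in files]
--     dtype = next((y for y in map(_year, reversed(ups)) if y is not None), '')
--     simu = any(map(_is_simu, ups))
--     ext = next((e for e in map(_ext, files) if e is not None), '')
--     return dtype, simu, ext
-- ===== Notes on version B (the rewrite author's own statement) =====
-- stated objective: alternative
-- what changed: A's single stateful loop threading (dtype, simu, ext) through every file is replaced by three independent passes with no accumulator: dtype is found by scanning the files back-to-front for the first file that determines a year (per-file effect computed by pure helpers, MC overriding the run year), simu is an any() over the files, and the extension is a forward first-match that stops at the first hit. (the early-exiting scans avoid re-matching every pattern on every file once the answer is fixed)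
import Mathlib
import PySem

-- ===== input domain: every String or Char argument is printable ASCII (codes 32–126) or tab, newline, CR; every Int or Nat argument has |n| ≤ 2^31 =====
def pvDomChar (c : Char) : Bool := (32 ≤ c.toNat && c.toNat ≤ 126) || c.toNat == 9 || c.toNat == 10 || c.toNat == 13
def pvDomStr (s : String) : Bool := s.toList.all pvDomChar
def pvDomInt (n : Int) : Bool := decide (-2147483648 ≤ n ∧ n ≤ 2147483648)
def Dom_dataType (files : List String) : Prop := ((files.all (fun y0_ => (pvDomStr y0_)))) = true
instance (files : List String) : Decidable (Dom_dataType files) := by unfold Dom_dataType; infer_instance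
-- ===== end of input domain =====

-- B replaces A's single stateful accumulator loop by three independent passes:
-- dtype by scanning files back-to-front for the first year-determining file,
-- simu by any(), extension by a forward first-match (objective: alternative).

-- hand port of Python's s.rpartition('.') on List Char (PySem has no rpartition);
-- exact: highest '.' splits, no '.' gives ('', '', s); used by both ports
def pyRPartitionDot (cs : List Char) : List Char × List Char × List Char :=
  let i := PySem.Chars.rfind cs ['.']
  if i < 0 then ([], [], cs)
  else (cs.take i.toNat, ['.'], cs.drop (i.toNat + 1))

-- ===== PORT A =====

-- one iteration of A's inner `for _f in flst` loop (token handled on List Char via PySem.Chars, exact)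
def pvExtStepA (ext : String) (tok : List Char) : String :=
  let t := PySem.Chars.stripChars (PySem.Chars.stripChars tok ['"']) ['\'']
  let r := pyRPartitionDot t
  if (r.2.1 ≠ [] ∧ (3 ≤ r.2.2.length ∧ r.2.2.length ≤ 5)) ∧ ext = "" then
    String.ofList (PySem.Chars.upper r.2.2)
  else ext

-- A's dtype if/elif cascade (d = the incoming dtype, kept when nothing matches)
def pvDtypeA (fu : String) (d : String) : String :=
  if 0 ≤ PySem.Str.find fu "COLLISION09" then "2009"
  else if 0 ≤ PySem.Str.find fu "COLLISION10" then "2010"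
  else if 0 ≤ PySem.Str.find fu "COLLISION11" then "2011"
  else if 0 ≤ PySem.Str.find fu "COLLISION12" then "2012"
  else if 0 ≤ PySem.Str.find fu "COLLISION13" then "2012"
  else if 0 ≤ PySem.Str.find fu "COLLISION15" then "2015"
  else if 0 ≤ PySem.Str.find fu "COLLISION16" then "2016"
  else if 0 ≤ PySem.Str.find fu "STRIPPING13" then "2011"
  else if 0 ≤ PySem.Str.find fu "STRIPPING17" then "2011"
  else if 0 ≤ PySem.Str.find fu "STRIPPING15" then "2011"
  else if 0 ≤ PySem.Str.find fu "STRIPPING19" then "2012"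
  else if 0 ≤ PySem.Str.find fu "STRIPPING20R1" then "2011"
  else if 0 ≤ PySem.Str.find fu "STRIPPING20" then "2012"
  else if 0 ≤ PySem.Str.find fu "STRIPPING21R1" then "2011"
  else if 0 ≤ PySem.Str.find fu "STRIPPING21" then "2012"
  else if 0 ≤ PySem.Str.find fu "STRIPPING22" then "2015"
  else if 0 ≤ PySem.Str.find fu "STRIPPING23" then "2015"
  else if 0 ≤ PySem.Str.find fu "STRIPPING24" then "2015"
  else if 0 ≤ PySem.Str.find fu "2K+10" then "2010"
  else if 0 ≤ PySem.Str.find fu "2K+11" then "2011"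
  else if 0 ≤ PySem.Str.find fu "2K+12" then "2012"
  else if 0 ≤ PySem.Str.find fu "2K+13" then "2013"
  else if 0 ≤ PySem.Str.find fu "2K+15" then "2015"
  else if 0 ≤ PySem.Str.find fu "2K+16" then "2016"
  else d

-- A's independent MC if/elif block, acting on (dtype, simu)
def pvDsA (fu : String) (dtype : String) (simu : Bool) : String × Bool :=
  if 0 ≤ PySem.Str.find fu "MC09" ∨ 0 ≤ PySem.Str.find fu "MC/2009" then ("2009", true)
  else if 0 ≤ PySem.Str.find fu "MC10" ∨ 0 ≤ PySem.Str.find fu "MC/2010" then ("2010", true)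
  else if 0 ≤ PySem.Str.find fu "MC11" ∨ 0 ≤ PySem.Str.find fu "MC/2011" then ("2011", true)
  else if 0 ≤ PySem.Str.find fu "MC12" ∨ 0 ≤ PySem.Str.find fu "MC/2012" then ("2012", true)
  else if 0 ≤ PySem.Str.find fu "MC13" ∨ 0 ≤ PySem.Str.find fu "MC/2013" then ("2013", true)
  else if 0 ≤ PySem.Str.find fu "MC15" ∨ 0 ≤ PySem.Str.find fu "MC/2015" then ("2015", true)
  else if 0 ≤ PySem.Str.find fu "/MC/" then (dtype, true)
  else if 0 ≤ PySem.Str.find fu "PYTHIA" then (dtype, true)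
  else if 0 ≤ PySem.Str.find fu "BCVEGPY" then (dtype, true)
  else (dtype, simu)

-- one iteration of A's `for f in files` loop
def pvStepA (st : String × Bool × String) (f : String) : String × Bool × String :=
  let fu := PySem.Str.upper f
  let dtype := pvDtypeA fu st.1
  let ds := pvDsA fu dtype st.2.1
  let ext := (PySem.Chars.splitOn f.toList [' ']).foldl pvExtStepA st.2.2
  (ds.1, ds.2, ext)

def dataType (files : List String) : String × Bool × String :=
  files.foldl pvStepA ("", false, "")

-- ===== PORT B =====

-- Source B's _mc_year: year an MC match would set, else none
def pvMcYear (fu : String) : Option String :=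
  if PySem.Str.isIn "MC09" fu || PySem.Str.isIn "MC/2009" fu then some "2009"
  else if PySem.Str.isIn "MC10" fu || PySem.Str.isIn "MC/2010" fu then some "2010"
  else if PySem.Str.isIn "MC11" fu || PySem.Str.isIn "MC/2011" fu then some "2011"
  else if PySem.Str.isIn "MC12" fu || PySem.Str.isIn "MC/2012" fu then some "2012"
  else if PySem.Str.isIn "MC13" fu || PySem.Str.isIn "MC/2013" fu then some "2013"
  else if PySem.Str.isIn "MC15" fu || PySem.Str.isIn "MC/2015" fu then some "2015"
  else none

-- Source B's _run_year
def pvRunYear (fu : String) : Option String :=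
  if PySem.Str.isIn "COLLISION09" fu then some "2009"
  else if PySem.Str.isIn "COLLISION10" fu then some "2010"
  else if PySem.Str.isIn "COLLISION11" fu then some "2011"
  else if PySem.Str.isIn "COLLISION12" fu then some "2012"
  else if PySem.Str.isIn "COLLISION13" fu then some "2012"
  else if PySem.Str.isIn "COLLISION15" fu then some "2015"
  else if PySem.Str.isIn "COLLISION16" fu then some "2016"
  else if PySem.Str.isIn "STRIPPING13" fu then some "2011"
  else if PySem.Str.isIn "STRIPPING17" fu then some "2011"
  else if PySem.Str.isIn "STRIPPING15" fu then some "2011"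
  else if PySem.Str.isIn "STRIPPING19" fu then some "2012"
  else if PySem.Str.isIn "STRIPPING20R1" fu then some "2011"
  else if PySem.Str.isIn "STRIPPING20" fu then some "2012"
  else if PySem.Str.isIn "STRIPPING21R1" fu then some "2011"
  else if PySem.Str.isIn "STRIPPING21" fu then some "2012"
  else if PySem.Str.isIn "STRIPPING22" fu then some "2015"
  else if PySem.Str.isIn "STRIPPING23" fu then some "2015"
  else if PySem.Str.isIn "STRIPPING24" fu then some "2015"
  else if PySem.Str.isIn "2K+10" fu then some "2010"
  else if PySem.Str.isIn "2K+11" fu then some "2011"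
  else if PySem.Str.isIn "2K+12" fu then some "2012"
  else if PySem.Str.isIn "2K+13" fu then some "2013"
  else if PySem.Str.isIn "2K+15" fu then some "2015"
  else if PySem.Str.isIn "2K+16" fu then some "2016"
  else none

-- Source B's _year: `_mc_year(fu) or _run_year(fu)` (years are non-empty, so `or` = orElse)
def pvYear (fu : String) : Option String :=
  match pvMcYear fu with
  | some y => some y
  | none => pvRunYear fu

-- Source B's _is_simu
def pvIsSimu (fu : String) : Bool :=
  (pvMcYear fu).isSome || PySem.Str.isIn "/MC/" fu
    || PySem.Str.isIn "PYTHIA" fu || PySem.Str.isIn "BCVEGPY" fu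

-- Source B's _ext per-token test (strip quotes, rpartition, 3..5 chars)
def pvExtOf (tok : List Char) : Option String :=
  let t := PySem.Chars.stripChars (PySem.Chars.stripChars tok ['"']) ['\'']
  let r := pyRPartitionDot t
  if r.2.1 ≠ [] ∧ (3 ≤ r.2.2.length ∧ r.2.2.length ≤ 5) then
    some (String.ofList (PySem.Chars.upper r.2.2))
  else none

-- Source B's _ext: first token with a valid extension
def pvFirstExt : List (List Char) → Option String
  | [] => none
  | t :: ts => match pvExtOf t with | some e => some e | none => pvFirstExt ts

def pvFileExt (f : String) : Option String :=
  pvFirstExt (PySem.Chars.splitOn f.toList [' '])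

-- Source B's `next((y for y in map(_year, reversed(ups)) if y is not None), '')`
def pvFindYear : List String → String
  | [] => ""
  | fu :: rest => match pvYear fu with | some y => y | none => pvFindYear rest

-- Source B's `next((e for e in map(_ext, files) if e is not None), '')`
def pvFindExt : List String → String
  | [] => ""
  | f :: rest => match pvFileExt f with | some e => e | none => pvFindExt rest

def dataType_alt (files : List String) : String × Bool × String :=
  let ups := files.map PySem.Str.upper
  (pvFindYear ups.reverse, ups.any pvIsSimu, pvFindExt files)

-- ===== PRECONDITION & SPEC =====
def Spec_dataType (files : List String) (out : String × Bool × String) : Prop := out = dataType_alt files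
instance (files : List String) (out : String × Bool × String) : Decidable (Spec_dataType files out) := by unfold Spec_dataType; infer_instance

-- ===== CLAIM (what is proved, stated in full; the proofs are below) =====
def Claim_equal_dataType : Prop := ∀ (files : List String), Dom_dataType files → Spec_dataType files (dataType files)

-- ===== LEMMAS AND PROOFS =====

-- A's `0 <= fu.find(p)` is B's `p in fu`
theorem pv_cond_eq (s p : String) : (0 ≤ PySem.Str.find s p) = (PySem.Str.isIn p s = true) :=
  propext ((PySem.Str.find_nonneg_iff s p).trans (PySem.Str.isIn_iff_infix p s).symm)

theorem pvExtOf_ne_empty (t : List Char) (e : String) (h : pvExtOf t = some e) : e ≠ "" := by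
  unfold pvExtOf at h
  dsimp only at h
  split at h
  case isTrue hc =>
    injection h with h
    subst h
    intro he
    have h2 := congrArg String.toList he
    simp [PySem.Chars.upper] at h2
    simp [h2] at hc
  case isFalse => exact absurd h (by simp)

theorem pvExtStepA_extOf (ext : String) (t : List Char) :
    pvExtStepA ext t = match pvExtOf t with
      | some e => if ext = "" then e else ext
      | none => ext := by
  unfold pvExtStepA pvExtOf
  dsimp only
  split_ifs with h1 h2 <;> simp_all

-- A's token loop computes B's first-match extension (when the accumulator is empty)
theorem pvExtFold (toks : List (List Char)) (ext : String) :
    toks.foldl pvExtStepA ext =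
      if ext = "" then
        match pvFirstExt toks with
        | some e => e
        | none => ext
      else ext := by
  induction toks generalizing ext with
  | nil => simp [pvFirstExt]
  | cons t ts ih =>
    simp only [List.foldl_cons, pvFirstExt, pvExtStepA_extOf]
    by_cases he : ext = ""
    · subst he
      cases h : pvExtOf t with
      | none => simp [ih]
      | some e =>
        have hne := pvExtOf_ne_empty t e h
        simp [ih, hne]
    · cases h : pvExtOf t <;> simp [ih, he]

-- A's dtype cascade is B's _run_year with a default
-- pushes .getD through an if-chain of `some` literals
theorem pv_getD_ite {α : Type} (c : Prop) [inst : Decidable c] (a : α) (x : Option α) (d : α) :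
    (if c then some a else x).getD d = if c then a else x.getD d := by
  split <;> rfl

theorem pvDtypeA_eq (fu d : String) : pvDtypeA fu d = (pvRunYear fu).getD d := by
  simp only [pvDtypeA, pvRunYear, pv_cond_eq, pv_getD_ite, Option.getD_none]

-- A's MC block is B's _mc_year override plus _is_simu
theorem pvDsA_eq (fu dtype : String) (simu : Bool) :
    pvDsA fu dtype simu = ((pvMcYear fu).getD dtype, simu || pvIsSimu fu) := by
  unfold pvDsA pvIsSimu pvMcYear
  simp only [pv_cond_eq, Bool.or_eq_true]
  split_ifs <;> simp_all

-- chaining the two defaults is B's _year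
theorem pvYear_getD (fu d : String) :
    (pvMcYear fu).getD ((pvRunYear fu).getD d) = (pvYear fu).getD d := by
  unfold pvYear
  cases h : pvMcYear fu <;> simp

-- one step of A, characterized through B's per-file helpers
theorem pvStepA_char (st : String × Bool × String) (f : String) :
    pvStepA st f =
      ((pvYear (PySem.Str.upper f)).getD st.1,
       st.2.1 || pvIsSimu (PySem.Str.upper f),
       if st.2.2 = "" then (pvFileExt f).getD st.2.2 else st.2.2) := by
  unfold pvStepA pvFileExt
  simp only [pvExtFold, pvDtypeA_eq, pvDsA_eq, pvYear_getD]
  refine Prod.ext rfl (Prod.ext rfl ?_)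
  split_ifs with h
  · cases pvFirstExt (PySem.Chars.splitOn f.toList [' ']) <;> rfl
  · rfl

-- proof-side generalizations of B's two first-match searches (arbitrary default)
def pvFindYearD : List String → String → String
  | [], d => d
  | fu :: rest, d => match pvYear fu with | some y => y | none => pvFindYearD rest d

def pvFirstExtFs : List String → Option String
  | [] => none
  | f :: rest => match pvFileExt f with | some e => some e | none => pvFirstExtFs rest

theorem pvFindYearD_append (l : List String) (fu : String) (d : String) :
    pvFindYearD (l ++ [fu]) d = pvFindYearD l ((pvYear fu).getD d) := by
  induction l with
  | nil => cases h : pvYear fu <;> simp [pvFindYearD, h]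
  | cons x xs ih => cases h : pvYear x <;> simp [pvFindYearD, h, ih]

theorem pvFindYearD_empty (l : List String) : pvFindYearD l "" = pvFindYear l := by
  induction l with
  | nil => rfl
  | cons x xs ih => cases h : pvYear x <;> simp [pvFindYearD, pvFindYear, h, ih]

theorem pvFileExt_ne_empty (f : String) (e : String) (h : pvFileExt f = some e) : e ≠ "" := by
  unfold pvFileExt at h
  generalize PySem.Chars.splitOn f.toList [' '] = toks at h
  induction toks with
  | nil => simp [pvFirstExt] at h
  | cons t ts ih =>
    simp only [pvFirstExt] at h
    cases h2 : pvExtOf t with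
    | some x =>
      rw [h2] at h; injection h with h
      exact h ▸ pvExtOf_ne_empty t x h2
    | none => rw [h2] at h; exact ih h

theorem pvFindExt_eq (fs : List String) : pvFindExt fs = (pvFirstExtFs fs).getD "" := by
  induction fs with
  | nil => rfl
  | cons f r ih => cases h : pvFileExt f <;> simp [pvFindExt, pvFirstExtFs, h, ih]

-- main invariant: A's fold equals B's three passes, for any start state
theorem pvFold_char (fs : List String) (st : String × Bool × String) :
    fs.foldl pvStepA st =
      (pvFindYearD (fs.map PySem.Str.upper).reverse st.1,
       st.2.1 || (fs.map PySem.Str.upper).any pvIsSimu,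
       if st.2.2 = "" then
         match pvFirstExtFs fs with | some e => e | none => st.2.2
       else st.2.2) := by
  induction fs generalizing st with
  | nil => simp [pvFindYearD, pvFirstExtFs]
  | cons f r ih =>
    rw [List.foldl_cons, ih, pvStepA_char]
    refine Prod.ext ?_ (Prod.ext ?_ ?_)
    · simp [pvFindYearD_append]
    · simp [Bool.or_assoc]
    · by_cases he : st.2.2 = ""
      · simp only [he, if_true]
        cases h : pvFileExt f with
        | some e =>
          have hne := pvFileExt_ne_empty f e h
          simp [h, hne, pvFirstExtFs]
        | none => simp [h, pvFirstExtFs]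
      · simp [he]

-- ===== VERDICT (by name: the statement is the Claim_ definition above) =====
theorem dataType_spec : Claim_equal_dataType := by
  intro files _
  unfold Spec_dataType dataType dataType_alt
  rw [pvFold_char]
  simp only [pvFindYearD_empty, Bool.false_or, pvFindExt_eq]
  rcases h : pvFirstExtFs files with _ | e <;> simp
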